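-- pv_equiv track=rewrite | github.com/Team-Zugig-zum-Erfolg/InformatiCup | abfahrt/Input.py | _isDouble
-- ===== SOURCE A (Python) =====
-- def _isDouble(string: str) -> bool:
--     """
--     check if string is double
--
--     Args:
--         string (str): input string
--
--     Returns:
--         (bool): true if this is a double (x.x or x)
--     """
--     s = string.split('.')
--     if len(s) > 2:
--         return False
--     else:   # [].[] or []
--         for si in s:
--             if not si.isdigit():
--                 return False
--         return True
-- ===== SOURCE B (Python) =====
-- def _isDouble(string: str) -> bool:
--     dots = 0
--     seglen = 0
--     for ch in string:
--         if ch == '.':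
--             dots += 1
--             if dots > 1 or seglen == 0:
--                 return False
--             seglen = 0
--         elif ch.isdigit():
--             seglen += 1
--         else:
--             return False
--     return seglen > 0
-- ===== Notes on version B (the rewrite author's own statement) =====
-- stated objective: alternative
-- what changed: Replaces split-on-dot-then-validate-each-segment with a single left-to-right character scan maintaining a dot counter and the current segment length.
import Mathlib
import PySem

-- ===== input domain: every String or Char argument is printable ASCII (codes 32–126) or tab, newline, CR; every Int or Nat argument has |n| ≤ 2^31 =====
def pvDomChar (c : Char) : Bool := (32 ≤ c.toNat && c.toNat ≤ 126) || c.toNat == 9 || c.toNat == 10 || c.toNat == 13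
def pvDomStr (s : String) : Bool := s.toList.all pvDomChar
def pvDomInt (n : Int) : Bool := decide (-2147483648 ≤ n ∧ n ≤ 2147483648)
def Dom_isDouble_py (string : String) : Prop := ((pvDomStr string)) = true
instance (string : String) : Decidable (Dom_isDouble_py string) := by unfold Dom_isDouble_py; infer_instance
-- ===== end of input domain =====

-- B replaces split-on-'.'-then-validate with a single left-to-right character scan (alternative decomposition, same cost).


-- ===== PORT A =====
-- the 'for si in s' loop with its early return
def aLoop : List String → Bool
  | [] => true
  | si :: rest => if !(PySem.Str.strIsdigit si) then false else aLoop rest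

def isDouble_py (string : String) : Bool :=
  match PySem.Str.split? string "." with
  | none => false   -- unreachable: the separator "." is nonempty
  | some s => if s.length > 2 then false else aLoop s

-- ===== PORT B =====
-- the 'for ch in string' scan of Source B, state = (dots, seglen)
def altLoop : List Char → Int → Int → Bool
  | [], _, seglen => decide (seglen > 0)
  | c :: rest, dots, seglen =>
    if c == '.' then
      if dots + 1 > 1 || seglen == 0 then false
      else altLoop rest (dots + 1) 0
    else if PySem.Chars.isdigit c then altLoop rest dots (seglen + 1)
    else false

def isDouble_py_alt (string : String) : Bool := altLoop string.toList 0 0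

-- ===== PRECONDITION & SPEC =====
def Spec_isDouble_py (string : String) (out : Bool) : Prop := out = isDouble_py_alt string
instance (string : String) (out : Bool) : Decidable (Spec_isDouble_py string out) := by unfold Spec_isDouble_py; infer_instance

-- ===== CLAIM (what is proved, stated in full; the proofs are below) =====
def Claim_equal_isDouble_py : Prop := ∀ (string : String), Dom_isDouble_py string → Spec_isDouble_py string (isDouble_py string)

-- ===== LEMMAS AND PROOFS =====

-- proof-side structural characterisation of splitting on '.'
def splitD : List Char → List (List Char)
  | [] => [[]]
  | c :: t => if c = '.' then [] :: splitD t else (splitD t).modifyHead (c :: ·)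

theorem splitD_ne_nil (cs : List Char) : splitD cs ≠ [] := by
  induction cs with
  | nil => simp [splitD]
  | cons c t ih =>
    simp only [splitD]
    split_ifs
    · simp
    · cases h : splitD t with
      | nil => exact absurd h ih
      | cons a r => simp [List.modifyHead]

theorem go_spec (l cur : List Char) (acc2 : List (List Char)) (fuel : Nat)
    (h : l.length ≤ fuel) :
    PySem.Chars.splitOn.go ['.'] fuel l cur acc2 =
      acc2.reverse ++ (splitD l).modifyHead (cur.reverse ++ ·) := by
  induction l generalizing cur acc2 fuel with
  | nil =>
    cases fuel with
    | zero => simp [PySem.Chars.splitOn.go, splitD, List.modifyHead]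
    | succ n => simp [PySem.Chars.splitOn.go, splitD, List.modifyHead]
  | cons c t ih =>
    cases fuel with
    | zero => simp at h
    | succ n =>
      simp only [List.length_cons, Nat.succ_le_succ_iff] at h
      by_cases hc : c = '.'
      · subst hc
        rw [show PySem.Chars.splitOn.go ['.'] (n+1) ('.' :: t) cur acc2 =
              PySem.Chars.splitOn.go ['.'] n t [] (cur.reverse :: acc2) by
            simp [PySem.Chars.splitOn.go, List.isPrefixOf]]
        rw [ih [] (cur.reverse :: acc2) n h]
        cases hs : splitD t with
        | nil => exact absurd hs (splitD_ne_nil t)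
        | cons p r => simp [splitD, List.modifyHead, hs]
      · rw [show PySem.Chars.splitOn.go ['.'] (n+1) (c :: t) cur acc2 =
              PySem.Chars.splitOn.go ['.'] n t (c :: cur) acc2 by
            simp [PySem.Chars.splitOn.go, List.isPrefixOf]
            intro h'; exact absurd h'.symm hc]
        rw [ih (c :: cur) acc2 n h]
        simp only [splitD, if_neg hc]
        cases hs : splitD t with
        | nil => exact absurd hs (splitD_ne_nil t)
        | cons p r => simp [List.modifyHead]

theorem splitOn_eq_splitD (cs : List Char) : PySem.Chars.splitOn cs ['.'] = splitD cs := by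
  rw [PySem.Chars.splitOn, go_spec cs [] [] (cs.length + 1) (by omega)]
  cases hs : splitD cs with
  | nil => exact absurd hs (splitD_ne_nil cs)
  | cons p r => simp [List.modifyHead]

theorem aLoop_eq_all (l : List String) : aLoop l = l.all PySem.Str.strIsdigit := by
  induction l with
  | nil => rfl
  | cons a t ih =>
    simp only [aLoop, List.all_cons, ← ih]
    by_cases h : PySem.Str.strIsdigit a <;> simp 

-- spec value of B's scan, as a function of the segment list and the current state
def bSpec : List (List Char) → Int → Int → Bool
  | [p], dots, n =>
      decide (dots ≤ 1) && decide (0 < n + (p.length : Int)) && p.all PySem.Chars.isdigit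
  | [p, q], dots, n =>
      decide (dots = 0) && decide (0 < n + (p.length : Int)) && p.all PySem.Chars.isdigit
        && decide (0 < (q.length : Int)) && q.all PySem.Chars.isdigit
  | _, _, _ => false

theorem altLoop_spec (cs : List Char) (dots n : Int) (hd : dots = 0 ∨ dots = 1)
    (hn : 0 ≤ n) : altLoop cs dots n = bSpec (splitD cs) dots n := by
  induction cs generalizing dots n with
  | nil =>
    simp only [splitD, altLoop, bSpec]
    rcases hd with h | h <;> subst h <;> simp
  | cons c t ih =>
    by_cases hc : c = '.'
    · subst hc
      simp only [splitD, altLoop, beq_self_eq_true, if_pos]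
      by_cases hz : n = 0
      · subst hz
        simp only [beq_self_eq_true, Bool.or_true, if_pos]
        cases hs : splitD t with
        | nil => exact absurd hs (splitD_ne_nil t)
        | cons p r => cases r with
          | nil => simp [bSpec]
          | cons q r' => cases r' <;> simp [bSpec]
      · have h1 : (decide (dots + 1 > 1) || (n == 0)) = decide (dots = 1) := by
          rcases hd with h | h <;> subst h <;> simp [hz]
        rw [h1]
        rcases hd with h | h <;> subst h
        · rw [if_neg (by simp)]
          have := ih 1 0 (Or.inr rfl) le_rfl
          rw [show (0:Int) + 1 = 1 by omega, this]
          cases hs : splitD t with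
          | nil => exact absurd hs (splitD_ne_nil t)
          | cons p r =>
            cases r with
            | nil => simp [bSpec, show (0:Int) < n by omega]
            | cons q r' => cases r' <;> simp [bSpec]
        · rw [if_pos (by simp)]
          cases hs : splitD t with
          | nil => exact absurd hs (splitD_ne_nil t)
          | cons p r => cases r with
            | nil => simp [bSpec]
            | cons q r' => cases r' <;> simp [bSpec]
    · have hb : (c == '.') = false := by simp [hc]
      simp only [splitD, if_neg hc, altLoop, hb, Bool.false_eq_true]
      by_cases hdig : PySem.Chars.isdigit c
      · rw [if_pos hdig, ih dots (n + 1) hd (by omega)]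
        cases hs : splitD t with
        | nil => exact absurd hs (splitD_ne_nil t)
        | cons p r =>
          cases r with
          | nil =>
            simp only [List.modifyHead, bSpec]
            rw [show n + 1 + (p.length : Int) = n + ((p.length : Int) + 1) by ring]
            simp [hdig]
          | cons q r' =>
            cases r' with
            | nil =>
              simp only [List.modifyHead, bSpec]
              rw [show n + 1 + (p.length : Int) = n + ((p.length : Int) + 1) by ring]
              simp [hdig]
            | cons _ _ => simp [bSpec, List.modifyHead]
      · rw [if_neg hdig]
        cases hs : splitD t with
        | nil => exact absurd hs (splitD_ne_nil t)
        | cons p r =>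
          cases r with
          | nil => simp [bSpec, List.modifyHead, hdig]
          | cons q r' => cases r' <;> simp [bSpec, List.modifyHead, hdig]

-- ===== VERDICT (by name: the statement is the Claim_ definition above) =====
theorem isDouble_py_spec : Claim_equal_isDouble_py := by
  intro s _
  unfold Spec_isDouble_py isDouble_py isDouble_py_alt
  have h1 : PySem.Str.split? s "." = some ((splitD s.toList).map String.ofList) := by
    rw [PySem.Str.split?, show (".".toList) = ['.'] from rfl, PySem.Chars.split?]
    simp [splitOn_eq_splitD]
  rw [h1]
  rw [altLoop_spec s.toList 0 0 (Or.inl rfl) le_rfl]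
  cases hs : splitD s.toList with
  | nil => exact absurd hs (splitD_ne_nil s.toList)
  | cons p r =>
    cases r with
    | nil =>
      simp [aLoop_eq_all, bSpec, PySem.Str.strIsdigit, PySem.Chars.strIsdigit]
      cases p <;> simp
    | cons q r' =>
      cases r' with
      | nil =>
        simp [aLoop_eq_all, bSpec, PySem.Str.strIsdigit, PySem.Chars.strIsdigit]
        cases p <;> cases q <;> simp [Bool.and_assoc]
      | cons a rr =>
        simp [bSpec]
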